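-- pv_equiv track=rewrite | github.com/maximandreychuk/leetcode | missingInteger.py | foo
-- ===== SOURCE A (Python) =====
-- def foo(nums):
--     prefix = nums[0]
--     for i in range(1, len(nums)):
--         if nums[i] - nums[i-1] == 1:
--             prefix += nums[i]
--         else:
--             break
--     while prefix in nums:
--         prefix += 1
--     return prefix
-- ===== SOURCE B (Python) =====
-- def foo(nums):
--     i = 1
--     while i < len(nums) and nums[i] - nums[i-1] == 1:
--         i += 1
--     candidate = sum(nums[:i])
--     for v in sorted(nums):
--         if v < candidate:
--             continue
--         if v == candidate:
--             candidate += 1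
--         else:
--             break
--     return candidate
-- ===== Notes on version B (the rewrite author's own statement) =====
-- stated objective: alternative
-- what changed: The repeated 'while prefix in nums' linear membership scans are replaced by sorting once and making a single ordered pass that bumps the candidate past equal values; the run-summing loop becomes an index search plus a slice sum.
import Mathlib
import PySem

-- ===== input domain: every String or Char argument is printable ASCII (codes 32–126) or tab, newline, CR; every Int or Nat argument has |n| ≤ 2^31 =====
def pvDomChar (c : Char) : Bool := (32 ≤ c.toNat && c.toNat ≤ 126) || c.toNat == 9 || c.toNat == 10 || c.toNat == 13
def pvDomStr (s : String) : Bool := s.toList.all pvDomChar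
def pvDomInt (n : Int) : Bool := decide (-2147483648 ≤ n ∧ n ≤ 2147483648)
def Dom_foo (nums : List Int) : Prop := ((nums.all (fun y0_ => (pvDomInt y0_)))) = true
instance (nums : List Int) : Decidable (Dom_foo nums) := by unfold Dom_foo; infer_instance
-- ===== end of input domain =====

-- B replaces the repeated 'while prefix in nums' membership scans by a sort-once-then-one-ordered-pass
-- strategy (objective: alternative algorithm; no speed claim).

-- ===== PORT A =====
-- the for-loop over range(1, len(nums)) with break (state: prefix)
def fooRun (nums : List Int) (i : Nat) (pre : Int) : Int :=
  if h : i < nums.length then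
    if nums[i] - nums[i-1]'(Nat.lt_of_le_of_lt (Nat.sub_le i 1) h) = 1 then
      fooRun nums (i+1) (pre + nums[i])
    else pre
  else pre
termination_by nums.length - i
decreasing_by exact Nat.sub_succ_lt_self nums.length i h

-- the while-loop: bump prefix while it is a member of nums
def fooFree (nums : List Int) (p : Int) : Int :=
  if h : p ∈ nums then fooFree nums (p+1) else p
termination_by (nums.filter (fun x => decide (p ≤ x))).length
decreasing_by
  have hsub : List.Sublist (List.filter (fun x => decide (p+1 ≤ x)) nums) (List.filter (fun x => decide (p ≤ x)) nums) :=
    List.monotone_filter_right nums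
      (fun a ha => decide_eq_true (le_of_lt (Int.lt_iff_add_one_le.mpr (of_decide_eq_true ha))))
  refine Nat.lt_of_le_of_ne hsub.length_le (fun e => ?_)
  have hp : p ∈ List.filter (fun x => decide (p ≤ x)) nums :=
    List.mem_filter.mpr ⟨h, decide_eq_true (le_refl p)⟩
  have hp2 : p ∈ List.filter (fun x => decide (p+1 ≤ x)) nums := (hsub.eq_of_length e).symm ▸ hp
  exact absurd (Int.lt_iff_add_one_le.mpr (of_decide_eq_true (List.mem_filter.mp hp2).2)) (Int.lt_irrefl p)

def foo (nums : List Int) : Int :=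
  fooFree nums (fooRun nums 1 ((PySem.List.pyGet? nums 0).getD 0))

-- ===== PORT B =====
-- the index-advancing while loop of Source B
def fooIdx (nums : List Int) (i : Nat) : Nat :=
  if h : i < nums.length then
    if nums[i] - nums[i-1]'(Nat.lt_of_le_of_lt (Nat.sub_le i 1) h) = 1 then fooIdx nums (i+1) else i
  else i
termination_by nums.length - i
decreasing_by exact Nat.sub_succ_lt_self nums.length i h

-- the single ordered pass over sorted(nums): skip v < c, bump on v == c, break on v > c
def fooScan : List Int → Int → Int
  | [], c => c
  | v :: t, c => if v < c then fooScan t c else if v = c then fooScan t (c+1) else c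

def foo_alt (nums : List Int) : Int :=
  fooScan (PySem.List.sorted nums (fun x => x) false)
    ((PySem.List.slice nums none (some ((fooIdx nums 1 : Nat) : Int))).sum)

-- ===== PRECONDITION & SPEC =====
-- A raises IndexError on the empty list (nums[0]); Pre_ excludes exactly that input.
def Pre_foo (nums : List Int) : Prop := nums ≠ []
instance (nums : List Int) : Decidable (Pre_foo nums) := by unfold Pre_foo; infer_instance
def pvWitness_foo : List Int := ([1, 2, 4])

def Spec_foo (nums : List Int) (out : Int) : Prop := out = foo_alt nums
instance (nums : List Int) (out : Int) : Decidable (Spec_foo nums out) := by unfold Spec_foo; infer_instance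

-- ===== CLAIM (what is proved, stated in full; the proofs are below) =====
def Claim_equal_foo : Prop := ∀ (nums : List Int), Dom_foo nums → Pre_foo nums → Spec_foo nums (foo nums)

-- ===== LEMMAS AND PROOFS =====

-- termination helper for the 'while prefix in nums: prefix += 1' loop (cited by decreasing_by)
theorem pvFilterMono (p : Int) (l : List Int) :
    (l.filter (fun x => decide (p < x))).length ≤ (l.filter (fun x => decide (p ≤ x))).length := by
  induction l with
  | nil => simp
  | cons a t ih =>
    simp only [List.filter_cons]
    by_cases h1 : p < a
    · have h2 : p ≤ a := by omega
      simp [h1, h2]; omega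
    · by_cases h2 : p ≤ a <;> simp [h1, h2] <;> omega

theorem pvFilterLt (p : Int) (l : List Int) (h : p ∈ l) :
    (l.filter (fun x => decide (p < x))).length < (l.filter (fun x => decide (p ≤ x))).length := by
  induction l with
  | nil => cases h
  | cons a t ih =>
    simp only [List.filter_cons]
    rcases List.mem_cons.mp h with rfl | hm
    · have h1 : ¬ (p < p) := by omega
      simp
      have := pvFilterMono p t
      omega
    · by_cases h1 : p < a
      · have h2 : p ≤ a := by omega
        simp [h1, h2]
        have := ih hm; omega
      · by_cases h2 : p ≤ a <;> simp [h1, h2] <;> (have := ih hm; omega)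


theorem fooIdx_ge (nums : List Int) (i : Nat) : i ≤ fooIdx nums i := by
  unfold fooIdx
  split
  · split
    · have := fooIdx_ge nums (i+1); omega
    · omega
  · omega
termination_by nums.length - i

-- A's run loop accumulates exactly the sum of nums[i : fooIdx nums i]
theorem phase1 (nums : List Int) (i : Nat) (pre : Int) :
    fooRun nums i pre = pre + ((nums.take (fooIdx nums i)).drop i).sum := by
  rw [fooRun, fooIdx]
  by_cases h : i < nums.length
  · simp only [dif_pos h]
    by_cases hc : nums[i] - nums[i-1]'(by omega) = 1
    · simp only [if_pos hc]
      rw [phase1 nums (i+1) (pre + nums[i])]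
      have hk : i + 1 ≤ fooIdx nums (i+1) := fooIdx_ge nums (i+1)
      have hlen : i < (nums.take (fooIdx nums (i+1))).length := by
        simp [List.length_take]; omega
      rw [List.drop_eq_getElem_cons hlen]
      simp [List.getElem_take]
      ring
    · simp only [if_neg hc]
      have : (nums.take i).drop i = [] := by
        apply List.drop_eq_nil_of_le; simp
      simp [this]
  · simp only [dif_neg h]
    have : (nums.take i).drop i = [] := by
      apply List.drop_eq_nil_of_le; simp
    simp [this]
termination_by nums.length - i

theorem scan_le (s : List Int) : ∀ c, c ≤ fooScan s c := by
  induction s with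
  | nil => intro c; simp [fooScan]
  | cons v t ih =>
    intro c
    simp only [fooScan]
    by_cases h1 : v < c
    · simp only [if_pos h1]; exact ih c
    · simp only [if_neg h1]
      by_cases h2 : v = c
      · simp only [if_pos h2]
        have := ih (c+1); omega
      · simp only [if_neg h2]; omega

-- the ordered pass finds the least value ≥ c outside a sorted list
theorem scan_spec (s : List Int) (hs : s.Pairwise (· ≤ ·)) :
    ∀ c, fooScan s c ∉ s ∧ ∀ m, c ≤ m → m < fooScan s c → m ∈ s := by
  induction s with
  | nil => intro c; simp [fooScan]
  | cons v t ih =>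
    have hvt : ∀ y ∈ t, v ≤ y := (List.pairwise_cons.mp hs).1
    have ht : t.Pairwise (· ≤ ·) := (List.pairwise_cons.mp hs).2
    intro c
    simp only [fooScan]
    by_cases h1 : v < c
    · simp only [if_pos h1]
      obtain ⟨hnm, hin⟩ := ih ht c
      refine ⟨?_, ?_⟩
      · have := scan_le t c
        simp only [List.mem_cons]
        rintro (rfl | hm)
        · omega
        · exact hnm hm
      · intro m hm1 hm2
        exact List.mem_cons.mpr (Or.inr (hin m hm1 hm2))
    · simp only [if_neg h1]
      by_cases h2 : v = c
      · simp only [if_pos h2]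
        obtain ⟨hnm, hin⟩ := ih ht (c+1)
        have hle := scan_le t (c+1)
        refine ⟨?_, ?_⟩
        · simp only [List.mem_cons]
          rintro (rfl | hm)
          · omega
          · exact hnm hm
        · intro m hm1 hm2
          by_cases hmc : m = c
          · subst hmc; exact List.mem_cons.mpr (Or.inl h2.symm)
          · exact List.mem_cons.mpr (Or.inr (hin m (by omega) hm2))
      · simp only [if_neg h2]
        refine ⟨?_, ?_⟩
        · simp only [List.mem_cons]
          rintro (rfl | hm)
          · omega
          · have := hvt c hm; omega
        · intro m hm1 hm2; omega

theorem free_spec (nums : List Int) (p : Int) :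
    p ≤ fooFree nums p ∧ fooFree nums p ∉ nums ∧
      ∀ m, p ≤ m → m < fooFree nums p → m ∈ nums := by
  rw [fooFree]
  by_cases h : p ∈ nums
  · simp only [dif_pos h]
    obtain ⟨h1, h2, h3⟩ := free_spec nums (p+1)
    refine ⟨by omega, h2, ?_⟩
    intro m hm1 hm2
    by_cases hmp : m = p
    · subst hmp; exact h
    · exact h3 m (by omega) hm2
  · simp only [dif_neg h]
    exact ⟨le_refl _, h, by intro m h1 h2; omega⟩
termination_by (nums.filter (fun x => decide (p ≤ x))).length
decreasing_by simpa using pvFilterLt p nums h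

-- ===== VERDICT (by name: the statement is the Claim_ definition above) =====
theorem foo_spec : Claim_equal_foo := by
  intro nums _ hpre
  unfold Spec_foo foo foo_alt
  obtain ⟨h, t, rfl⟩ : ∃ h t, nums = h :: t := by
    cases nums with
    | nil => exact absurd rfl hpre
    | cons h t => exact ⟨h, t, rfl⟩
  set nums := h :: t with hn
  -- the two starting values coincide
  have hget : (PySem.List.pyGet? nums 0).getD 0 = h := by
    simp [hn, PySem.List.pyGet?, PySem.List.pyIdx?]
  have hk1 : 1 ≤ fooIdx nums 1 := fooIdx_ge nums 1
  obtain ⟨m, hm⟩ : ∃ m, fooIdx nums 1 = m + 1 := ⟨fooIdx nums 1 - 1, by omega⟩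
  have hslice : PySem.List.slice nums none (some ((fooIdx nums 1 : Nat) : Int)) = nums.take (fooIdx nums 1) :=
    PySem.List.slice_to_natCast nums (fooIdx nums 1)
  have hstart : fooRun nums 1 ((PySem.List.pyGet? nums 0).getD 0) =
      (PySem.List.slice nums none (some ((fooIdx nums 1 : Nat) : Int))).sum := by
    rw [hget, phase1 nums 1 h, hslice, hm, hn, List.take_succ_cons]
    simp
  rw [hstart]
  -- both sides compute the least value ≥ c not in nums
  set c := (PySem.List.slice nums none (some ((fooIdx nums 1 : Nat) : Int))).sum with hc
  set s := PySem.List.sorted nums (fun x => x) false with hsdef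
  have hmem : ∀ x : Int, x ∈ s ↔ x ∈ nums := fun x => by
    rw [hsdef]; exact PySem.List.mem_sorted nums (fun y => y) false x
  have hpair : s.Pairwise (· ≤ ·) := by
    rw [hsdef]; exact PySem.List.sorted_pairwise nums (fun x => x)
  obtain ⟨hf1, hf2, hf3⟩ := free_spec nums c
  obtain ⟨hs2, hs3⟩ := scan_spec s hpair c
  have hs1 := scan_le s c
  rcases lt_trichotomy (fooFree nums c) (fooScan s c) with hlt | heq | hgt
  · exact absurd ((hmem _).mp (hs3 _ hf1 hlt)) hf2
  · exact heq
  · exact absurd ((hmem _).mpr (hf3 _ hs1 hgt)) hs2
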